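-- pv_equiv track=rewrite | github.com/AlbertBartalis/First-Project | Pb ora.py | fct_1
-- ===== SOURCE A (Python) =====
-- def fct_1(lista):
--     sum_even = 0
--     sum_odd = 0
--     for i in range(len(lista)): #len(n) merge in toti pasii de la 0 la n-1
--         if i % 2 == 0:
--             sum_even += lista[i]
--         else:
--             sum_odd += lista[i]
--     return sum_even - sum_odd
-- ===== SOURCE B (Python) =====
-- def fct_1(lista):
--     return sum(lista[0::2]) - sum(lista[1::2])
-- ===== Notes on version B (the rewrite author's own statement) =====
-- stated objective: idiomatic
-- what changed: Replaces the index loop with a parity branch into two accumulators by two staged passes over strided slices: sum of the even-index slice lista[0::2] minus sum of the odd-index slice lista[1::2]; the slicing and summing run in C instead of the interpreted per-element loop.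
import Mathlib
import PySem

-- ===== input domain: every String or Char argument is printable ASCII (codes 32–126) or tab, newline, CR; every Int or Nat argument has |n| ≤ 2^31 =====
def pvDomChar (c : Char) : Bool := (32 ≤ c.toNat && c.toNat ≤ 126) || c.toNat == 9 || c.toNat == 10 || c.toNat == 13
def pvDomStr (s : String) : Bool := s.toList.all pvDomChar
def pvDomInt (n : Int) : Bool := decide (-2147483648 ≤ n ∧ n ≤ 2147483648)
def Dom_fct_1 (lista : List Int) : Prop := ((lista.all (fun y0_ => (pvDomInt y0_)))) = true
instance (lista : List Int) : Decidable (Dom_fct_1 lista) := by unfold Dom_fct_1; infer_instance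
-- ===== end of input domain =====

-- B replaces A's single index loop with a parity branch by two staged passes over the strided slices lista[0::2] and lista[1::2] (objective: idiomatic).

-- ===== PORT A =====
def fct_1 (lista : List Int) : Int :=
  let r := (PySem.List.pyRange 0 (PySem.List.len lista) 1).foldl
    (fun (acc : Int × Int) i =>
      if PySem.Int.mod i 2 = 0 then (acc.1 + PySem.List.pyGetD lista i 0, acc.2)
      else (acc.1, acc.2 + PySem.List.pyGetD lista i 0)) (0, 0)
  r.1 - r.2

-- ===== PORT B =====
-- sum(lista[0::2]) - sum(lista[1::2]); step-2 slices via PySem.List.slice? (step 2 ≠ 0, so getD [] never fires)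
def fct_1_alt (lista : List Int) : Int :=
  ((PySem.List.slice? lista (some 0) none 2).getD []).sum
    - ((PySem.List.slice? lista (some 1) none 2).getD []).sum

-- ===== PRECONDITION & SPEC =====
def Spec_fct_1 (lista : List Int) (out : Int) : Prop := out = fct_1_alt lista
instance (lista : List Int) (out : Int) : Decidable (Spec_fct_1 lista out) := by unfold Spec_fct_1; infer_instance

-- ===== CLAIM =====
def Claim_equal_fct_1 : Prop := ∀ (lista : List Int), Dom_fct_1 lista → Spec_fct_1 lista (fct_1 lista)

-- ===== LEMMAS AND PROOFS =====

-- every second element starting at the head: lista[0::2]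
def pvStride2 : List Int → List Int
  | [] => []
  | [a] => [a]
  | a :: _ :: t => a :: pvStride2 t

-- alternating sum a0 - a1 + a2 - …, the common value of both programs
def pvAltSum : List Int → Int
  | [] => 0
  | a :: l => a - pvAltSum l

theorem pv_filterMap_stride (xs : List Int) :
    (List.range ((xs.length + 1)/2)).filterMap (fun k => xs[2*k]?) = pvStride2 xs := by
  match xs with
  | [] => simp [pvStride2]
  | [a] => simp [pvStride2]
  | a :: b :: t =>
    have h : ((a :: b :: t).length + 1)/2 = (t.length + 1)/2 + 1 := by simp; omega
    rw [h, List.range_succ_eq_map, List.filterMap_cons]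
    simp only [List.filterMap_map, Function.comp]
    have he : (List.range ((t.length + 1)/2)).filterMap (fun k => (a :: b :: t)[2*(k+1)]?)
        = (List.range ((t.length + 1)/2)).filterMap (fun k => t[2*k]?) := by
      apply List.filterMap_congr
      intro k _
      have h2 : 2*(k+1) = 2*k + 1 + 1 := by omega
      simp [h2]
    simp only [Nat.succ_eq_add_one]
    rw [he, pv_filterMap_stride t]
    simp [pvStride2]

theorem pv_sliceE (xs : List Int) :
    PySem.List.slice? xs (some 0) none 2 = some (pvStride2 xs) := by
  simp only [PySem.List.slice?, PySem.List.sliceIndices]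
  norm_num
  have hC : (if 0 < xs.length then (((xs.length:Int) + 2 - 1)/2).toNat else 0)
      = (xs.length + 1)/2 := by
    split_ifs with h <;> omega
  rw [hC, ← pv_filterMap_stride xs]
  apply List.filterMap_congr
  intro k _
  have h2 : ((2:Int) * (k:Int)).toNat = 2*k := by omega
  rw [h2]

theorem pv_sliceO (xs : List Int) :
    PySem.List.slice? xs (some 1) none 2 = some (pvStride2 xs.tail) := by
  simp only [PySem.List.slice?, PySem.List.sliceIndices]
  norm_num
  match xs with
  | [] => simp [pvStride2]
  | a :: t =>
    have hmin : min 1 ((a :: t).length : Int) = 1 := by simp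
    rw [hmin]
    have hC : (if 1 < (a :: t).length then ((((a :: t).length:Int) - 1 + 2 - 1)/2).toNat else 0)
        = (t.length + 1)/2 := by
      rcases Nat.lt_or_ge 1 (a :: t).length with h | h
      · rw [if_pos h]
        simp only [List.length_cons] at h ⊢
        omega
      · rw [if_neg (by omega)]
        simp only [List.length_cons] at h ⊢
        omega
    rw [hC, List.tail_cons, ← pv_filterMap_stride t]
    apply List.filterMap_congr
    intro k _
    have h2 : ((1 : Int) + 2*(k:Int)).toNat = 2*k + 1 := by omega
    rw [h2]
    simp [List.getElem?_cons_succ]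

theorem pvStride2_cons (a : Int) (t : List Int) :
    pvStride2 (a :: t) = a :: pvStride2 t.tail := by
  match t with
  | [] => simp [pvStride2]
  | b :: t' => simp [pvStride2]

theorem pv_stride_sub (xs : List Int) :
    (pvStride2 xs).sum - (pvStride2 xs.tail).sum = pvAltSum xs := by
  match xs with
  | [] => simp [pvStride2, pvAltSum]
  | [a] => simp [pvStride2, pvAltSum]
  | a :: b :: t =>
    have ih := pv_stride_sub t
    simp only [pvStride2, List.tail_cons, pvStride2_cons, List.sum_cons, pvAltSum]
    omega

theorem pv_a_foldl (lista : List Int) : ∀ (xs : List Int) (a : Nat),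
    lista.drop a = xs → ∀ (e o : Int),
    ((PySem.List.pyRange (a : Int) (lista.length : Int) 1).foldl
      (fun (acc : Int × Int) i =>
        if PySem.Int.mod i 2 = 0 then (acc.1 + PySem.List.pyGetD lista i 0, acc.2)
        else (acc.1, acc.2 + PySem.List.pyGetD lista i 0)) (e, o)).1
    - ((PySem.List.pyRange (a : Int) (lista.length : Int) 1).foldl
      (fun (acc : Int × Int) i =>
        if PySem.Int.mod i 2 = 0 then (acc.1 + PySem.List.pyGetD lista i 0, acc.2)
        else (acc.1, acc.2 + PySem.List.pyGetD lista i 0)) (e, o)).2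
    = e - o + (if a % 2 = 0 then pvAltSum xs else -pvAltSum xs) := by
  intro xs
  induction xs with
  | nil =>
    intro a hdrop e o
    have hlen : lista.length ≤ a := by
      simpa [List.drop_eq_nil_iff] using hdrop
    rw [PySem.List.pyRange_one_eq_nil (by exact_mod_cast hlen)]
    simp [pvAltSum]
  | cons x xs ih =>
    intro a hdrop e o
    have hlt : a < lista.length := by
      have h := congrArg List.length hdrop
      simp [List.length_drop] at h
      omega
    have hget : PySem.List.pyGetD lista (a : Int) 0 = x := by
      have h0 : lista[a]? = some x := by
        have h := congrArg (fun (l : List Int) => l[0]?) hdrop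
        simpa [List.getElem?_drop] using h
      simp [PySem.List.pyGetD_natCast, List.getD_eq_getElem?_getD, h0]
    have hdrop' : lista.drop (a + 1) = xs := by
      have : (lista.drop a).drop 1 = xs := by rw [hdrop]; simp
      simpa [List.drop_drop, Nat.add_comm] using this
    have hmod : PySem.Int.mod (a : Int) 2 = ((a % 2 : Nat) : Int) := by
      exact_mod_cast PySem.Int.mod_natCast a 2
    rw [PySem.List.pyRange_one_cons (by exact_mod_cast hlt)]
    simp only [List.foldl_cons]
    have hcast : ((a : Int) + 1) = ((a + 1 : Nat) : Int) := by push_cast; ring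
    rcases Nat.even_or_odd a with he | ho
    · have h2 : a % 2 = 0 := Nat.even_iff.mp he
      have h2' : (a + 1) % 2 = 1 := by omega
      rw [hmod]
      simp only [h2, Nat.cast_zero, reduceIte, hget, hcast]
      rw [ih (a + 1) hdrop' (e + x) o]
      simp [h2', pvAltSum]
      ring
    · have h2 : a % 2 = 1 := Nat.odd_iff.mp ho
      have h2' : (a + 1) % 2 = 0 := by omega
      rw [hmod]
      simp only [h2]
      rw [if_neg (by decide), hget, hcast, ih (a + 1) hdrop' e (o + x)]
      simp [h2', pvAltSum]
      ring

-- ===== VERDICT =====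
theorem fct_1_spec : Claim_equal_fct_1 := by
  unfold Claim_equal_fct_1 Spec_fct_1
  intro lista _
  have hA := pv_a_foldl lista lista 0 (by simp) 0 0
  simp only [Nat.cast_zero] at hA
  simp only [fct_1, fct_1_alt, PySem.List.len_eq, pv_sliceE, pv_sliceO, Option.getD_some]
  rw [pv_stride_sub]
  simpa using hA
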